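-- pv_equiv track=rewrite | github.com/varungaddalay-github/daily-engineering-workout | problems/general_practice/dec_2025/2025_12_05.py | suspicious_linked_accounts
-- ===== SOURCE A (Python) =====
-- from collections import defaultdict, deque
--
-- def suspicious_linked_accounts(links, k):
--     adj_list = defaultdict(list)
--
--     for u, v in links:
--         adj_list[u].append(v)
--         adj_list[v].append(u)
--
--     visited = set()
--     res = set()
--
--     for node in adj_list:
--         if node not in visited:
--             q = deque([node])
--             component = []
--             visited.add(node)
--
--             while q:
--                 curr = q.popleft()
--                 component.append(curr)
--                 for neighbor in adj_list[curr]: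
--                     if neighbor not in visited:
--                         visited.add(neighbor)
--                         q.append(neighbor)
--
--             if len(component) > k:
--                 res.update(component)
--     return sorted(res)
-- ===== SOURCE B (Python) =====
-- def suspicious_linked_accounts(links, k):
--     # Incremental component merging (label + member lists) instead of adjacency list + BFS.
--     idx = {}       # node -> component id
--     members = {}   # component id -> list of member nodes
--     fresh = 0
--     for u, v in links:
--         if u not in idx:
--             idx[u] = fresh
--             members[fresh] = [u]
--             fresh += 1
--         if v not in idx:
--             idx[v] = fresh
--             members[fresh] = [v]
--             fresh += 1
--         a, b = idx[u], idx[v]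
--         if a != b:
--             for w in members[b]:
--                 idx[w] = a
--             members[a] = members[a] + members.pop(b)
--     out = set()
--     for c in members.values():
--         if len(c) > k:
--             out.update(c)
--     return sorted(out)
-- ===== Notes on version B (the rewrite author's own statement) =====
-- stated objective: alternative
-- what changed: Replaces the adjacency-list + BFS traversal by incremental edge processing that maintains a node-to-component-id labelling plus per-component member lists, merging two components whenever an edge joins them; no graph traversal or queue remains.
import Mathlib
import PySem

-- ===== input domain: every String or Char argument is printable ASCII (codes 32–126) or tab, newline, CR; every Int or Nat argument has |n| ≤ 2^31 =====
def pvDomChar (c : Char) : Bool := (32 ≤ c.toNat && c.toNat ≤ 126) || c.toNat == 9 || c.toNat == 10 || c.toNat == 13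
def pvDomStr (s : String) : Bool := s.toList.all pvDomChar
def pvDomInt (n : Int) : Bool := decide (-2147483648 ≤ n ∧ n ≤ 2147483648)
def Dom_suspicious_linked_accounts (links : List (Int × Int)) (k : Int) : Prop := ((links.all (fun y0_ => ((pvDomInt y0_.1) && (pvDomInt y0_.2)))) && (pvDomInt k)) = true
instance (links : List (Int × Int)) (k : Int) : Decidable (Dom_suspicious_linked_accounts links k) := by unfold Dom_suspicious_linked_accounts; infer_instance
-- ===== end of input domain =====

-- B replaces A's adjacency-list + BFS component traversal by incremental edge processing with a
-- node→component-id labelling and per-component member lists (objective: alternative algorithm, similar cost).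


-- ===== PORT A =====
-- adj_list = defaultdict(list); for u, v in links: adj_list[u].append(v); adj_list[v].append(u)
def pvBuildAdj (links : List (Int × Int)) : PySem.Dict Int (List Int) :=
  links.foldl (fun d uv =>
    (d.modify uv.1 [] (fun l => l ++ [uv.2])).modify uv.2 [] (fun l => l ++ [uv.1]))
    PySem.Dict.empty

-- the BFS 'while q:' loop; fuel only makes the recursion structural (it is never exhausted: each
-- popped node was marked visited when enqueued, so pops ≤ number of nodes ≤ 2*len(links))
def pvBfsLoop (adj : PySem.Dict Int (List Int)) :
    Nat → List Int → List Int → PySem.Set Int → List Int × PySem.Set Int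
  | 0, _, comp, visited => (comp, visited)
  | _ + 1, [], comp, visited => (comp, visited)
  | fuel + 1, curr :: q, comp, visited =>
      let comp' := comp ++ [curr]
      let st := (adj.getD curr []).foldl
        (fun (st : PySem.Set Int × List Int) nb =>
          if nb ∈ st.1 then st else (PySem.Set.add st.1 nb, st.2 ++ [nb]))
        (visited, q)
      pvBfsLoop adj fuel st.2 comp' st.1

def suspicious_linked_accounts (links : List (Int × Int)) (k : Int) : List Int :=
  let adj := pvBuildAdj links
  let st := adj.keys.foldl
    (fun (st : PySem.Set Int × PySem.Set Int) node =>
      if node ∈ st.1 then st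
      else
        let r := pvBfsLoop adj (2 * links.length + 1) [node] [] (PySem.Set.add st.1 node)
        (r.2, if k < (r.1.length : Int) then PySem.Set.update st.2 r.1 else st.2))
    (PySem.Set.empty, PySem.Set.empty)
  PySem.List.sorted st.2 (fun x => x) false

-- ===== PORT B =====
-- one edge step on the state (idx : node → comp id, members : comp id → member list, fresh id)
def pvBStep (st : PySem.Dict Int Int × PySem.Dict Int (List Int) × Int) (uv : Int × Int) :
    PySem.Dict Int Int × PySem.Dict Int (List Int) × Int :=
  let st1 := if st.1.contains uv.1 then st
    else (st.1.insert uv.1 st.2.2, st.2.1.insert st.2.2 [uv.1], st.2.2 + 1)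
  let st2 := if st1.1.contains uv.2 then st1
    else (st1.1.insert uv.2 st1.2.2, st1.2.1.insert st1.2.2 [uv.2], st1.2.2 + 1)
  let a := st2.1.getD uv.1 0
  let b := st2.1.getD uv.2 0
  if a ≠ b then
    ((st2.2.1.getD b []).foldl (fun d w => d.insert w a) st2.1,
     (st2.2.1.erase b).insert a (st2.2.1.getD a [] ++ st2.2.1.getD b []),
     st2.2.2)
  else st2

def suspicious_linked_accounts_alt (links : List (Int × Int)) (k : Int) : List Int :=
  let st := links.foldl pvBStep (PySem.Dict.empty, PySem.Dict.empty, 0)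
  let out := st.2.1.values.foldl
    (fun out c => if k < (c.length : Int) then PySem.Set.update out c else out)
    PySem.Set.empty
  PySem.List.sorted out (fun x => x) false

-- ===== PRECONDITION & SPEC =====
def Spec_suspicious_linked_accounts (links : List (Int × Int)) (k : Int) (out : List Int) : Prop := out = suspicious_linked_accounts_alt links k
instance (links : List (Int × Int)) (k : Int) (out : List Int) : Decidable (Spec_suspicious_linked_accounts links k out) := by unfold Spec_suspicious_linked_accounts; infer_instance

-- ===== CLAIM (what is proved, stated in full; the proofs are below) =====
def Claim_equal_suspicious_linked_accounts : Prop := ∀ (links : List (Int × Int)) (k : Int), Dom_suspicious_linked_accounts links k → Spec_suspicious_linked_accounts links k (suspicious_linked_accounts links k)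

-- ===== LEMMAS AND PROOFS =====

/- The undirected adjacency and reachability relations generated by the edge list. -/
def pvAdjP (links : List (Int × Int)) (a b : Int) : Prop := (a, b) ∈ links ∨ (b, a) ∈ links

def pvReach (links : List (Int × Int)) : Int → Int → Prop := Relation.ReflTransGen (pvAdjP links)

def pvNode (links : List (Int × Int)) (x : Int) : Prop := ∃ y, pvAdjP links x y

/- L lists exactly the connected component of x (all nodes reachable from x), without duplicates. -/
def pvIsComp (links : List (Int × Int)) (x : Int) (L : List Int) : Prop :=
  L.Nodup ∧ ∀ y, y ∈ L ↔ (pvNode links y ∧ pvReach links x y)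

/- x lies in a component with more than k members. -/
def pvBig (links : List (Int × Int)) (k x : Int) : Prop :=
  ∃ L, pvIsComp links x L ∧ k < (L.length : Int)

lemma pvAdjP_symm {links : List (Int × Int)} {a b : Int} (h : pvAdjP links a b) :
    pvAdjP links b a := h.elim Or.inr Or.inl

lemma pvReach_symm {links : List (Int × Int)} {a b : Int} (h : pvReach links a b) :
    pvReach links b a := by
  induction h with
  | refl => exact Relation.ReflTransGen.refl
  | tail _ hbc ih => exact Relation.ReflTransGen.trans (Relation.ReflTransGen.single (pvAdjP_symm hbc)) ih

lemma pvNode_of_adj_left {links : List (Int × Int)} {a b : Int} (h : pvAdjP links a b) :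
    pvNode links a := ⟨b, h⟩

lemma pvNode_of_adj_right {links : List (Int × Int)} {a b : Int} (h : pvAdjP links a b) :
    pvNode links b := ⟨a, pvAdjP_symm h⟩

lemma pvReach_node {links : List (Int × Int)} {x y : Int} (h : pvReach links x y) :
    x = y ∨ (pvNode links x ∧ pvNode links y) := by
  induction h with
  | refl => exact Or.inl rfl
  | tail _ hbc ih =>
    right
    refine ⟨?_, pvNode_of_adj_right hbc⟩
    rcases ih with rfl | ⟨hx, _⟩
    · exact pvNode_of_adj_left hbc
    · exact hx

lemma pvIsComp_shift {links : List (Int × Int)} {x y : Int} {L : List Int}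
    (h : pvIsComp links x L) (hy : y ∈ L) : pvIsComp links y L := by
  obtain ⟨hnd, hm⟩ := h
  have hxy : pvReach links x y := ((hm y).1 hy).2
  refine ⟨hnd, fun z => (hm z).trans (and_congr_right fun _ => ?_)⟩
  exact ⟨fun hz => Relation.ReflTransGen.trans (pvReach_symm hxy) hz,
         fun hz => Relation.ReflTransGen.trans hxy hz⟩

lemma pvIsComp_perm {links : List (Int × Int)} {x : Int} {L L' : List Int}
    (h1 : pvIsComp links x L) (h2 : pvIsComp links x L') : L.Perm L' :=
  (List.perm_ext_iff_of_nodup h1.1 h2.1).2 fun z => (h1.2 z).trans (h2.2 z).symm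

lemma pvBig_iff {links : List (Int × Int)} {k x : Int} {L : List Int}
    (h : pvIsComp links x L) : pvBig links k x ↔ k < (L.length : Int) := by
  constructor
  · rintro ⟨L', h', hk⟩
    rwa [(pvIsComp_perm h' h).length_eq] at hk
  · exact fun hk => ⟨L, h, hk⟩

lemma pvClosed_reach {links : List (Int × Int)} {S : List Int} {x y : Int}
    (hS : ∀ a ∈ S, ∀ b, pvAdjP links a b → b ∈ S)
    (hx : x ∈ S) (h : pvReach links x y) : y ∈ S := by
  induction h with
  | refl => exact hx
  | tail _ hbc ih => exact hS _ ih _ hbc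

lemma pvAdjP_cons {u v a b : Int} {rest : List (Int × Int)} :
    pvAdjP ((u, v) :: rest) a b ↔ (a = u ∧ b = v) ∨ (a = v ∧ b = u) ∨ pvAdjP rest a b := by
  simp only [pvAdjP, List.mem_cons, Prod.mk.injEq]
  tauto

lemma pvNode_cons {u v a : Int} {rest : List (Int × Int)} :
    pvNode ((u, v) :: rest) a ↔ a = u ∨ a = v ∨ pvNode rest a := by
  constructor
  · rintro ⟨y, hy⟩
    rcases pvAdjP_cons.1 hy with ⟨rfl, _⟩ | ⟨rfl, _⟩ | h
    · exact Or.inl rfl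
    · exact Or.inr (Or.inl rfl)
    · exact Or.inr (Or.inr ⟨y, h⟩)
  · rintro (rfl | rfl | ⟨y, hy⟩)
    · exact ⟨v, pvAdjP_cons.2 (Or.inl ⟨rfl, rfl⟩)⟩
    · exact ⟨u, pvAdjP_cons.2 (Or.inr (Or.inl ⟨rfl, rfl⟩))⟩
    · exact ⟨y, pvAdjP_cons.2 (Or.inr (Or.inr hy))⟩

lemma pvAdjP_append {E : List (Int × Int)} {u v a b : Int} :
    pvAdjP (E ++ [(u, v)]) a b ↔ pvAdjP E a b ∨ (a = u ∧ b = v) ∨ (a = v ∧ b = u) := by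
  simp only [pvAdjP, List.mem_append, List.mem_singleton, Prod.mk.injEq]
  tauto

lemma pvNode_append {E : List (Int × Int)} {u v w : Int} :
    pvNode (E ++ [(u, v)]) w ↔ (pvNode E w ∨ w = u) ∨ w = v := by
  constructor
  · rintro ⟨y, hy⟩
    rcases pvAdjP_append.1 hy with h | ⟨rfl, _⟩ | ⟨rfl, _⟩
    · exact Or.inl (Or.inl ⟨y, h⟩)
    · exact Or.inl (Or.inr rfl)
    · exact Or.inr rfl
  · rintro ((⟨y, hy⟩ | rfl) | rfl)
    · exact ⟨y, pvAdjP_append.2 (Or.inl hy)⟩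
    · exact ⟨v, pvAdjP_append.2 (Or.inr (Or.inl ⟨rfl, rfl⟩))⟩
    · exact ⟨u, pvAdjP_append.2 (Or.inr (Or.inr ⟨rfl, rfl⟩))⟩

lemma pvReach_mono {E : List (Int × Int)} {e : Int × Int} {x y : Int}
    (h : pvReach E x y) : pvReach (E ++ [e]) x y := by
  induction h with
  | refl => exact Relation.ReflTransGen.refl
  | tail _ hbc ih =>
    exact Relation.ReflTransGen.tail ih (by rcases hbc with h | h
                                            · exact Or.inl (List.mem_append_left _ h)
                                            · exact Or.inr (List.mem_append_left _ h))

lemma pvReach_append {E : List (Int × Int)} {u v x y : Int} :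
    pvReach (E ++ [(u, v)]) x y ↔
      pvReach E x y ∨ (pvReach E x u ∧ pvReach E v y) ∨ (pvReach E x v ∧ pvReach E u y) := by
  constructor
  · intro h
    induction h with
    | refl => exact Or.inl Relation.ReflTransGen.refl
    | tail _ hbc ih =>
      rcases pvAdjP_append.1 hbc with hE | ⟨rfl, rfl⟩ | ⟨rfl, rfl⟩
      · rcases ih with h1 | ⟨h1, h2⟩ | ⟨h1, h2⟩
        · exact Or.inl (h1.tail hE)
        · exact Or.inr (Or.inl ⟨h1, h2.tail hE⟩)
        · exact Or.inr (Or.inr ⟨h1, h2.tail hE⟩)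
      · rcases ih with h1 | ⟨h1, h2⟩ | ⟨h1, h2⟩
        · exact Or.inr (Or.inl ⟨h1, Relation.ReflTransGen.refl⟩)
        · exact Or.inr (Or.inl ⟨h1, Relation.ReflTransGen.refl⟩)
        · exact Or.inl h1
      · rcases ih with h1 | ⟨h1, h2⟩ | ⟨h1, h2⟩
        · exact Or.inr (Or.inr ⟨h1, Relation.ReflTransGen.refl⟩)
        · exact Or.inl h1
        · exact Or.inr (Or.inr ⟨h1, Relation.ReflTransGen.refl⟩)
  · have hstep : pvReach (E ++ [(u, v)]) u v :=
      Relation.ReflTransGen.single (pvAdjP_append.2 (Or.inr (Or.inl ⟨rfl, rfl⟩)))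
    rintro (h | ⟨h1, h2⟩ | ⟨h1, h2⟩)
    · exact pvReach_mono h
    · exact ((pvReach_mono h1).trans hstep).trans (pvReach_mono h2)
    · exact ((pvReach_mono h1).trans (pvReach_symm hstep)).trans (pvReach_mono h2)

/- ===== A-side: the adjacency dictionary ===== -/

lemma pvMemKeysModify {d : PySem.Dict Int (List Int)} {k k' : Int} {d0 : List Int} {f : List Int → List Int} :
    k' ∈ (d.modify k d0 f).keys ↔ k' ∈ d.keys ∨ k' = k := by
  rw [PySem.Dict.keys_modify]
  by_cases hc : d.contains k = true
  · rw [PySem.Dict.keys_insert_of_contains _ _ hc]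
    have hk := (PySem.Dict.contains_iff_mem_keys d k).1 hc
    constructor
    · exact Or.inl
    · rintro (h | rfl) <;> assumption
  · rw [PySem.Dict.keys_insert_of_not_contains _ _ (by simpa using hc)]
    simp [List.mem_append]

lemma pvNodupKeysModify {d : PySem.Dict Int (List Int)} {k : Int} {d0 : List Int} {f : List Int → List Int}
    (h : d.keys.Nodup) : (d.modify k d0 f).keys.Nodup := by
  rw [PySem.Dict.keys_modify]
  exact PySem.Dict.nodup_keys_insert _ _ _ h

lemma pvLenKeysModify {d : PySem.Dict Int (List Int)} {k : Int} {d0 : List Int} {f : List Int → List Int} :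
    (d.modify k d0 f).keys.length ≤ d.keys.length + 1 := by
  rw [PySem.Dict.keys_modify]
  by_cases hc : d.contains k = true
  · rw [PySem.Dict.keys_insert_of_contains _ _ hc]; omega
  · rw [PySem.Dict.keys_insert_of_not_contains _ _ (by simpa using hc)]
    simp

lemma pvBuildAdj_fold (links : List (Int × Int)) :
    ∀ d : PySem.Dict Int (List Int),
      (∀ a b, b ∈ (links.foldl (fun d uv =>
          (d.modify uv.1 [] (fun l => l ++ [uv.2])).modify uv.2 [] (fun l => l ++ [uv.1])) d).getD a []
        ↔ b ∈ d.getD a [] ∨ pvAdjP links a b) ∧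
      (∀ a, a ∈ (links.foldl (fun d uv =>
          (d.modify uv.1 [] (fun l => l ++ [uv.2])).modify uv.2 [] (fun l => l ++ [uv.1])) d).keys
        ↔ a ∈ d.keys ∨ pvNode links a) ∧
      (d.keys.Nodup → (links.foldl (fun d uv =>
          (d.modify uv.1 [] (fun l => l ++ [uv.2])).modify uv.2 [] (fun l => l ++ [uv.1])) d).keys.Nodup) ∧
      ((links.foldl (fun d uv =>
          (d.modify uv.1 [] (fun l => l ++ [uv.2])).modify uv.2 [] (fun l => l ++ [uv.1])) d).keys.length
        ≤ d.keys.length + 2 * links.length) := by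
  induction links with
  | nil =>
    intro d
    refine ⟨fun a b => ?_, fun a => ?_, fun h => h, by simp⟩
    · simp [pvAdjP]
    · simp [pvNode, pvAdjP]
  | cons uv rest ih =>
    intro d
    obtain ⟨u, v⟩ := uv
    set d' := ((d.modify u [] (fun l => l ++ [v])).modify v [] (fun l => l ++ [u])) with hd'
    have f1 : ∀ a b, b ∈ d'.getD a [] ↔ b ∈ d.getD a [] ∨ (a = u ∧ b = v) ∨ (a = v ∧ b = u) := by
      intro a b
      rw [hd']
      simp only [PySem.Dict.getD_modify]
      split_ifs <;> (try subst_vars) <;> (try simp only [List.mem_append, List.mem_singleton]) <;> tauto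
    have f2 : ∀ a, a ∈ d'.keys ↔ a ∈ d.keys ∨ a = u ∨ a = v := by
      intro a
      rw [hd', pvMemKeysModify, pvMemKeysModify]
      tauto
    have f3 : d.keys.Nodup → d'.keys.Nodup := fun h => pvNodupKeysModify (pvNodupKeysModify h)
    have f4a := pvLenKeysModify (d := d) (k := u) (d0 := ([] : List Int)) (f := fun l => l ++ [v])
    have f4b := pvLenKeysModify (d := d.modify u [] (fun l => l ++ [v])) (k := v)
      (d0 := ([] : List Int)) (f := fun l => l ++ [u])
    have f4 : d'.keys.length ≤ d.keys.length + 2 := by rw [hd']; omega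
    obtain ⟨g1, g2, g3, g4⟩ := ih d'
    refine ⟨fun a b => ?_, fun a => ?_, fun h => ?_, ?_⟩
    · simp only [List.foldl_cons]
      rw [show ((d.modify u [] (fun l => l ++ [v])).modify v [] (fun l => l ++ [u])) = d' from rfl,
        g1 a b, f1 a b, pvAdjP_cons]
      tauto
    · simp only [List.foldl_cons]
      rw [show ((d.modify u [] (fun l => l ++ [v])).modify v [] (fun l => l ++ [u])) = d' from rfl,
        g2 a, f2 a, pvNode_cons]
      tauto
    · simp only [List.foldl_cons]
      rw [show ((d.modify u [] (fun l => l ++ [v])).modify v [] (fun l => l ++ [u])) = d' from rfl]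
      exact g3 (f3 h)
    · simp only [List.foldl_cons, List.length_cons]
      rw [show ((d.modify u [] (fun l => l ++ [v])).modify v [] (fun l => l ++ [u])) = d' from rfl]
      omega

lemma pvAdj_getD_mem (links : List (Int × Int)) (a b : Int) :
    b ∈ (pvBuildAdj links).getD a [] ↔ pvAdjP links a b := by
  have h := (pvBuildAdj_fold links PySem.Dict.empty).1 a b
  simpa [pvBuildAdj, PySem.Dict.getD_empty] using h

lemma pvAdj_keys_mem (links : List (Int × Int)) (a : Int) :
    a ∈ (pvBuildAdj links).keys ↔ pvNode links a := by
  have h := (pvBuildAdj_fold links PySem.Dict.empty).2.1 a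
  simpa [pvBuildAdj, PySem.Dict.keys_empty] using h

lemma pvAdj_keys_nodup (links : List (Int × Int)) : (pvBuildAdj links).keys.Nodup := by
  have h := (pvBuildAdj_fold links PySem.Dict.empty).2.2.1
  simpa [pvBuildAdj, PySem.Dict.keys_empty] using h

lemma pvAdj_keys_len (links : List (Int × Int)) :
    (pvBuildAdj links).keys.length ≤ 2 * links.length := by
  have h := (pvBuildAdj_fold links PySem.Dict.empty).2.2.2
  simpa [pvBuildAdj, PySem.Dict.keys_empty] using h

/- ===== A-side: the BFS loop ===== -/

lemma pvInnerFold_spec (nbs : List Int) :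
    ∀ (visited q : List Int),
      ∃ new : List Int,
        nbs.foldl (fun (st : PySem.Set Int × List Int) nb =>
            if nb ∈ st.1 then st else (PySem.Set.add st.1 nb, st.2 ++ [nb])) (visited, q)
          = (visited ++ new, q ++ new) ∧
        new.Nodup ∧ (∀ y ∈ new, y ∈ nbs ∧ y ∉ visited) ∧ (∀ y ∈ nbs, y ∉ visited → y ∈ new) := by
  induction nbs with
  | nil =>
    intro visited q
    exact ⟨[], by simp, List.nodup_nil, by simp, by simp⟩
  | cons nb rest ih =>
    intro visited q
    by_cases h : nb ∈ visited
    · obtain ⟨new, he, hnd, hsub, hcomp⟩ := ih visited q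
      refine ⟨new, by simpa [h] using he, hnd, ?_, ?_⟩
      · exact fun y hy => ⟨List.mem_cons_of_mem _ (hsub y hy).1, (hsub y hy).2⟩
      · intro y hy hyv
        rcases List.mem_cons.1 hy with rfl | hy'
        · exact absurd h hyv
        · exact hcomp y hy' hyv
    · obtain ⟨new, he, hnd, hsub, hcomp⟩ := ih (visited ++ [nb]) (q ++ [nb])
      refine ⟨nb :: new, ?_, ?_, ?_, ?_⟩
      · simp only [List.foldl_cons, if_neg h, PySem.Set.add_of_not_mem h]
        rw [he]
        simp
      · refine List.nodup_cons.2 ⟨fun hn => ?_, hnd⟩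
        exact (hsub nb hn).2 (List.mem_append_right _ (List.mem_singleton_self _))
      · intro y hy
        rcases List.mem_cons.1 hy with rfl | hy'
        · exact ⟨List.mem_cons_self, h⟩
        · exact ⟨List.mem_cons_of_mem _ (hsub y hy').1,
            fun hv => (hsub y hy').2 (List.mem_append_left _ hv)⟩
      · intro y hy hyv
        rcases List.mem_cons.1 hy with rfl | hy'
        · exact List.mem_cons_self
        · by_cases hynb : y = nb
          · exact hynb ▸ List.mem_cons_self
          · refine List.mem_cons_of_mem _ (hcomp y hy' ?_)
            simp only [List.mem_append, List.mem_singleton]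
            rintro (hv | hv)
            · exact hyv hv
            · exact hynb hv

lemma pvCountFilter {K visited new : List Int} (hK : K.Nodup) (hnd : new.Nodup)
    (hsubK : ∀ y ∈ new, y ∈ K) (hdis : ∀ y ∈ new, y ∉ visited) :
    (K.filter (fun x => decide (x ∉ visited ++ new))).length + new.length
      = (K.filter (fun x => decide (x ∉ visited))).length := by
  have hperm : (K.filter (fun x => decide (x ∉ visited))).Perm
      (K.filter (fun x => decide (x ∉ visited ++ new)) ++ new) := by
    refine (List.perm_ext_iff_of_nodup (hK.filter _) ?_).2 ?_
    · refine List.Nodup.append (hK.filter _) hnd ?_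
      intro y hy hyn
      have := (List.mem_filter.1 hy).2
      simp only [decide_eq_true_eq, List.mem_append] at this
      exact this (Or.inr hyn)
    · intro y
      simp only [List.mem_filter, List.mem_append, decide_eq_true_eq]
      by_cases hy : y ∈ new
      · simp [hy, hsubK y hy, hdis y hy]
      · simp only [hy, or_false]
  have hl := hperm.length_eq
  rw [List.length_append] at hl
  omega

lemma pvBfs_spec (links : List (Int × Int)) (s : Int) :
    ∀ (fuel : Nat) (q comp V0 : List Int),
      (V0 ++ comp ++ q).Nodup →
      q.length + (((pvBuildAdj links).keys).filter
          (fun x => decide (x ∉ V0 ++ comp ++ q))).length ≤ fuel →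
      (∀ y, y ∈ comp ∨ y ∈ q → pvReach links s y) →
      (∀ a ∈ V0, ∀ b, pvAdjP links a b → b ∈ V0) →
      (∀ a ∈ comp, ∀ b, pvAdjP links a b → b ∈ V0 ++ comp ++ q) →
      (∀ y, y ∈ comp ∨ y ∈ q → y ∈ (pvBuildAdj links).keys) →
      ∃ comp' : List Int,
        pvBfsLoop (pvBuildAdj links) fuel q comp (V0 ++ comp ++ q) = (comp', V0 ++ comp') ∧
        (V0 ++ comp').Nodup ∧
        (∀ y, y ∈ comp ∨ y ∈ q → y ∈ comp') ∧
        (∀ y ∈ comp', pvReach links s y ∧ y ∈ (pvBuildAdj links).keys) ∧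
        (∀ a ∈ comp', ∀ b, pvAdjP links a b → b ∈ V0 ++ comp') := by
  intro fuel
  induction fuel with
  | zero =>
    intro q comp V0 hnd hfuel hreach hcl0 hclc hkeys
    have hq : q = [] := List.eq_nil_of_length_eq_zero (by omega)
    subst hq
    refine ⟨comp, ?_, ?_, ?_, ?_, ?_⟩
    · simp [pvBfsLoop]
    · simpa using hnd
    · intro y hy; rcases hy with hy | hy
      · exact hy
      · simp at hy
    · intro y hy; exact ⟨hreach y (Or.inl hy), hkeys y (Or.inl hy)⟩
    · intro a ha b hb
      have := hclc a ha b hb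
      simpa using this
  | succ fuel ih =>
    intro q comp V0 hnd hfuel hreach hcl0 hclc hkeys
    cases q with
    | nil =>
      refine ⟨comp, ?_, ?_, ?_, ?_, ?_⟩
      · simp [pvBfsLoop]
      · simpa using hnd
      · intro y hy; rcases hy with hy | hy
        · exact hy
        · simp at hy
      · intro y hy; exact ⟨hreach y (Or.inl hy), hkeys y (Or.inl hy)⟩
      · intro a ha b hb
        have := hclc a ha b hb
        simpa using this
    | cons curr qrest =>
      obtain ⟨new, he, hndnew, hsub, hcomp⟩ :=
        pvInnerFold_spec ((pvBuildAdj links).getD curr []) (V0 ++ comp ++ (curr :: qrest)) qrest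
      have hnewnbs : ∀ y ∈ new, pvAdjP links curr y := by
        intro y hy
        exact (pvAdj_getD_mem links curr y).1 (hsub y hy).1
      have hnewkeys : ∀ y ∈ new, y ∈ (pvBuildAdj links).keys := by
        intro y hy
        exact (pvAdj_keys_mem links y).2 (pvNode_of_adj_right (hnewnbs y hy))
      have hrearr : (V0 ++ comp ++ (curr :: qrest)) ++ new
          = V0 ++ (comp ++ [curr]) ++ (qrest ++ new) := by
        simp only [List.append_assoc, List.cons_append, List.nil_append]
      have hnd2 : (V0 ++ (comp ++ [curr]) ++ (qrest ++ new)).Nodup := by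
        rw [← hrearr]
        refine List.Nodup.append hnd hndnew ?_
        intro y hy hyn
        exact (hsub y hyn).2 hy
      have hcount := pvCountFilter (K := (pvBuildAdj links).keys)
        (visited := V0 ++ comp ++ (curr :: qrest)) (new := new)
        (pvAdj_keys_nodup links) hndnew hnewkeys (fun y hy => (hsub y hy).2)
      have hfilter_congr : ((pvBuildAdj links).keys.filter
            (fun x => decide (x ∉ (V0 ++ comp ++ (curr :: qrest)) ++ new))).length
          = ((pvBuildAdj links).keys.filter
            (fun x => decide (x ∉ V0 ++ (comp ++ [curr]) ++ (qrest ++ new)))).length := by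
        rw [hrearr]
      have hfuel2 : (qrest ++ new).length + (((pvBuildAdj links).keys).filter
          (fun x => decide (x ∉ V0 ++ (comp ++ [curr]) ++ (qrest ++ new)))).length ≤ fuel := by
        rw [← hfilter_congr]
        simp only [List.length_append, List.length_cons] at hfuel ⊢
        omega
      have hreach2 : ∀ y, y ∈ comp ++ [curr] ∨ y ∈ qrest ++ new → pvReach links s y := by
        intro y hy
        rcases hy with hy | hy
        · rcases List.mem_append.1 hy with hy | hy
          · exact hreach y (Or.inl hy)
          · rw [List.mem_singleton] at hy
            exact hy ▸ hreach curr (Or.inr (List.mem_cons_self))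
        · rcases List.mem_append.1 hy with hy | hy
          · exact hreach y (Or.inr (List.mem_cons_of_mem _ hy))
          · exact Relation.ReflTransGen.tail
              (hreach curr (Or.inr (List.mem_cons_self))) (hnewnbs y hy)
      have hclc2 : ∀ a ∈ comp ++ [curr], ∀ b, pvAdjP links a b
          → b ∈ V0 ++ (comp ++ [curr]) ++ (qrest ++ new) := by
        intro a ha b hb
        rw [← hrearr]
        rcases List.mem_append.1 ha with ha | ha
        · exact List.mem_append_left _ (hclc a ha b hb)
        · rw [List.mem_singleton] at ha
          by_cases hbv : b ∈ V0 ++ comp ++ (curr :: qrest)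
          · exact List.mem_append_left _ hbv
          · refine List.mem_append_right _ (hcomp b ?_ hbv)
            refine (pvAdj_getD_mem links curr b).2 ?_
            rw [← ha]
            exact hb
      have hkeys2 : ∀ y, y ∈ comp ++ [curr] ∨ y ∈ qrest ++ new
          → y ∈ (pvBuildAdj links).keys := by
        intro y hy
        rcases hy with hy | hy
        · rcases List.mem_append.1 hy with hy | hy
          · exact hkeys y (Or.inl hy)
          · rw [List.mem_singleton] at hy
            exact hy ▸ hkeys curr (Or.inr (List.mem_cons_self))
        · rcases List.mem_append.1 hy with hy | hy
          · exact hkeys y (Or.inr (List.mem_cons_of_mem _ hy))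
          · exact hnewkeys y hy
      obtain ⟨comp', hc1, hc2, hc3, hc4, hc5⟩ :=
        ih (qrest ++ new) (comp ++ [curr]) V0 hnd2 hfuel2 hreach2 hcl0 hclc2 hkeys2
      refine ⟨comp', ?_, hc2, ?_, hc4, hc5⟩
      · show pvBfsLoop (pvBuildAdj links) (fuel + 1) (curr :: qrest) comp
          (V0 ++ comp ++ (curr :: qrest)) = (comp', V0 ++ comp')
        simp only [pvBfsLoop]
        rw [he]
        simpa [hrearr] using hc1
      · intro y hy
        rcases hy with hy | hy
        · exact hc3 y (Or.inl (List.mem_append_left _ hy))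
        · rcases List.mem_cons.1 hy with rfl | hy'
          · exact hc3 y (Or.inl (List.mem_append_right _ (List.mem_singleton_self _)))
          · exact hc3 y (Or.inr (List.mem_append_left _ hy'))

/- ===== A-side: the outer loop ===== -/

def pvStepA (links : List (Int × Int)) (k : Int)
    (st : PySem.Set Int × PySem.Set Int) (node : Int) : PySem.Set Int × PySem.Set Int :=
  if node ∈ st.1 then st
  else
    let r := pvBfsLoop (pvBuildAdj links) (2 * links.length + 1) [node] [] (PySem.Set.add st.1 node)
    (r.2, if k < (r.1.length : Int) then PySem.Set.update st.2 r.1 else st.2)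

def pvStA (links : List (Int × Int)) (k : Int) : PySem.Set Int × PySem.Set Int :=
  (pvBuildAdj links).keys.foldl (pvStepA links k) (PySem.Set.empty, PySem.Set.empty)

lemma pvPortA_eq (links : List (Int × Int)) (k : Int) :
    suspicious_linked_accounts links k = PySem.List.sorted (pvStA links k).2 (fun x => x) false := rfl

lemma pvOuter_spec (links : List (Int × Int)) (k : Int) :
    ∀ (ks : List Int) (st : PySem.Set Int × PySem.Set Int),
      (∀ y ∈ ks, y ∈ (pvBuildAdj links).keys) →
      st.1.Nodup →
      (∀ a ∈ st.1, ∀ b, pvAdjP links a b → b ∈ st.1) →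
      (∀ y ∈ st.1, y ∈ (pvBuildAdj links).keys) →
      st.2.Nodup →
      (∀ x, x ∈ st.2 ↔ x ∈ st.1 ∧ pvBig links k x) →
      (ks.foldl (pvStepA links k) st).1.Nodup ∧
      (∀ a ∈ (ks.foldl (pvStepA links k) st).1, ∀ b, pvAdjP links a b
        → b ∈ (ks.foldl (pvStepA links k) st).1) ∧
      (∀ y ∈ (ks.foldl (pvStepA links k) st).1, y ∈ (pvBuildAdj links).keys) ∧
      (∀ y ∈ st.1, y ∈ (ks.foldl (pvStepA links k) st).1) ∧
      (∀ y ∈ ks, y ∈ (ks.foldl (pvStepA links k) st).1) ∧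
      (ks.foldl (pvStepA links k) st).2.Nodup ∧
      (∀ x, x ∈ (ks.foldl (pvStepA links k) st).2
        ↔ x ∈ (ks.foldl (pvStepA links k) st).1 ∧ pvBig links k x) := by
  intro ks
  induction ks with
  | nil =>
    intro st hsub h1 hcl hkk h2 hchar
    exact ⟨h1, hcl, hkk, fun y hy => hy, by simp, h2, hchar⟩
  | cons node rest ih =>
    intro st hsub h1 hcl hkk h2 hchar
    simp only [List.foldl_cons]
    by_cases hv : node ∈ st.1
    · have hstep : pvStepA links k st node = st := by
        unfold pvStepA
        rw [if_pos hv]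
      rw [hstep]
      obtain ⟨g1, g2, gk, g3, g4, g5, g6⟩ :=
        ih st (fun y hy => hsub y (List.mem_cons_of_mem _ hy)) h1 hcl hkk h2 hchar
      refine ⟨g1, g2, gk, g3, ?_, g5, g6⟩
      intro y hy
      rcases List.mem_cons.1 hy with rfl | hy'
      · exact g3 y hv
      · exact g4 y hy'
    · -- run one BFS from node
      have hnodekey : node ∈ (pvBuildAdj links).keys := hsub node (List.mem_cons_self)
      have hvisited : PySem.Set.add st.1 node = st.1 ++ [] ++ [node] := by
        rw [PySem.Set.add_of_not_mem hv]
        simp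
      have hnd0 : (st.1 ++ [] ++ [node]).Nodup := by
        simp only [List.append_nil]
        refine List.Nodup.append h1 (List.nodup_singleton _) ?_
        intro y hy hyn
        rw [List.mem_singleton] at hyn
        exact hv (hyn ▸ hy)
      have hfuel0 : ([node] : List Int).length + (((pvBuildAdj links).keys).filter
          (fun x => decide (x ∉ st.1 ++ [] ++ [node]))).length ≤ 2 * links.length + 1 := by
        have h1' := List.length_filter_le
          (fun x => decide (x ∉ st.1 ++ [] ++ [node])) (pvBuildAdj links).keys
        have h2' := pvAdj_keys_len links
        simp only [List.length_singleton]
        omega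
      obtain ⟨comp', hc1, hc2, hc3, hc4, hc5⟩ := pvBfs_spec links node (2 * links.length + 1)
        [node] [] st.1 hnd0 hfuel0
        (by intro y hy
            rcases hy with hy | hy
            · simp at hy
            · rw [List.mem_singleton] at hy
              exact hy ▸ Relation.ReflTransGen.refl)
        hcl
        (by intro a ha; simp at ha)
        (by intro y hy
            rcases hy with hy | hy
            · simp at hy
            · rw [List.mem_singleton] at hy
              exact hy ▸ hnodekey)
      have hstep : pvStepA links k st node
          = (st.1 ++ comp', if k < (comp'.length : Int)
              then PySem.Set.update st.2 comp' else st.2) := by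
        unfold pvStepA
        rw [if_neg hv]
        simp only [hvisited, hc1]
      rw [hstep]
      -- the component is exactly the reachability class of node
      have hnodecomp : node ∈ comp' :=
        hc3 node (Or.inr (List.mem_singleton_self _))
      have hV0comp : ∀ y ∈ comp', y ∉ st.1 := by
        intro y hy hyv
        have := List.disjoint_of_nodup_append hc2
        exact this hyv hy
      have hcompclosed : pvIsComp links node comp' := by
        refine ⟨(List.nodup_append.1 hc2).2.1, fun y => ⟨fun hy => ?_, fun hy => ?_⟩⟩
        · have hr := (hc4 y hy).1
          exact ⟨(pvAdj_keys_mem links y).1 (hc4 y hy).2, hr⟩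
        · obtain ⟨hnode, hr⟩ := hy
          -- walk the path: it stays inside st.1 ++ comp', and cannot enter st.1
          have hmem : y ∈ st.1 ++ comp' := by
            refine pvClosed_reach (links := links) (S := st.1 ++ comp') ?_ ?_ hr
            · intro a ha b hb
              rcases List.mem_append.1 ha with ha | ha
              · exact List.mem_append_left _ (hcl a ha b hb)
              · exact hc5 a ha b hb
            · exact List.mem_append_right _ hnodecomp
          rcases List.mem_append.1 hmem with hy' | hy'
          · exfalso
            have hback : pvReach links y node := pvReach_symm hr
            have : node ∈ st.1 := pvClosed_reach hcl hy' hback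
            exact hv this
          · exact hy'
      have hclosed' : ∀ a ∈ st.1 ++ comp', ∀ b, pvAdjP links a b → b ∈ st.1 ++ comp' := by
        intro a ha b hb
        rcases List.mem_append.1 ha with ha' | ha'
        · exact List.mem_append_left _ (hcl a ha' b hb)
        · exact hc5 a ha' b hb
      obtain ⟨g1, g2, gk, g3, g4, g5, g6⟩ := ih
        (st.1 ++ comp', if k < (comp'.length : Int) then PySem.Set.update st.2 comp' else st.2)
        (fun y hy => hsub y (List.mem_cons_of_mem _ hy))
        hc2
        hclosed'
        (by intro y hy
            rcases List.mem_append.1 hy with hy' | hy'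
            · exact hkk y hy'
            · exact (hc4 y hy').2)
        (by by_cases hk : k < (comp'.length : Int)
            · simp only [if_pos hk]
              exact PySem.Set.nodup_update _ _ h2
            · simp only [if_neg hk]
              exact h2)
        (by intro x
            by_cases hk : k < (comp'.length : Int)
            · simp only [if_pos hk, PySem.Set.mem_update]
              constructor
              · rintro (hx | hx)
                · obtain ⟨hx1, hx2⟩ := (hchar x).1 hx
                  exact ⟨List.mem_append_left _ hx1, hx2⟩
                · refine ⟨List.mem_append_right _ hx, ?_⟩
                  rw [pvBig_iff (pvIsComp_shift hcompclosed hx)]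
                  exact hk
              · rintro ⟨hx1, hx2⟩
                rcases List.mem_append.1 hx1 with hx' | hx'
                · exact Or.inl ((hchar x).2 ⟨hx', hx2⟩)
                · exact Or.inr hx'
            · simp only [if_neg hk]
              constructor
              · intro hx
                obtain ⟨hx1, hx2⟩ := (hchar x).1 hx
                exact ⟨List.mem_append_left _ hx1, hx2⟩
              · rintro ⟨hx1, hx2⟩
                rcases List.mem_append.1 hx1 with hx' | hx'
                · exact (hchar x).2 ⟨hx', hx2⟩
                · exfalso
                  rw [pvBig_iff (pvIsComp_shift hcompclosed hx')] at hx2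
                  exact hk hx2)
      refine ⟨g1, g2, gk, ?_, ?_, g5, g6⟩
      · intro y hy
        exact g3 y (List.mem_append_left _ hy)
      · intro y hy
        rcases List.mem_cons.1 hy with rfl | hy'
        · exact g3 y (List.mem_append_right _ hnodecomp)
        · exact g4 y hy'

lemma pvCharA (links : List (Int × Int)) (k : Int) :
    (pvStA links k).2.Nodup ∧
      ∀ x, x ∈ (pvStA links k).2 ↔ pvNode links x ∧ pvBig links k x := by
  obtain ⟨g1, g2, gk, g3, g4, g5, g6⟩ := pvOuter_spec links k (pvBuildAdj links).keys
    (PySem.Set.empty, PySem.Set.empty)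
    (fun y hy => hy)
    List.nodup_nil
    (by intro a ha; simp at ha)
    (by intro y hy; simp at hy)
    List.nodup_nil
    (by intro x; simp [PySem.Set.empty])
  refine ⟨g5, fun x => (g6 x).trans (and_congr_left fun _ => ?_)⟩
  constructor
  · intro hx
    exact (pvAdj_keys_mem links x).1 (gk x hx)
  · intro hx
    exact g4 x ((pvAdj_keys_mem links x).2 hx)

/- ===== B-side: dictionary helper lemmas ===== -/

lemma pvFindFilterNe (x k : Int) {ν : Type} (l : List (Int × ν)) :
    List.find? (fun p => p.1 == x) (l.filter (fun p => !(p.1 == k)))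
      = if x = k then none else List.find? (fun p => p.1 == x) l := by
  induction l with
  | nil => simp
  | cons p t ih =>
    simp only [List.filter_cons, List.find?_cons]
    by_cases hpk : p.1 = k
    · have h1 : (!(p.1 == k)) = false := by simp [hpk]
      rw [h1]
      simp only [Bool.false_eq_true, if_false]
      rw [ih]
      by_cases hxk : x = k
      · simp [hxk]
      · have hpx : (p.1 == x) = false := by
          simp only [beq_eq_false_iff_ne, ne_eq, hpk]
          exact Ne.symm hxk
        simp [hpx, hxk]
    · have h1 : (!(p.1 == k)) = true := by simp [hpk]
      rw [h1]
      simp only [if_true]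
      rw [List.find?_cons]
      by_cases hpx : (p.1 == x) = true
      · have hx : ¬ (x = k) := by
          rw [beq_iff_eq] at hpx
          rw [← hpx]
          exact hpk
        simp [hpx, hx]
      · simp only [Bool.not_eq_true] at hpx
        rw [hpx]
        simp only [Bool.false_eq_true, if_false]
        rw [ih]

lemma pvGetErase {ν : Type} (d : PySem.Dict Int ν) (k x : Int) :
    (d.erase k).get? x = if x = k then none else d.get? x := by
  show Option.map (fun p => p.2)
      (List.find? (fun p => p.1 == x) (d.items.filter (fun p => !(p.1 == k))))
    = if x = k then none else d.get? x
  rw [pvFindFilterNe]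
  by_cases h : x = k
  · simp [h]
  · simp only [if_neg h]
    rfl

lemma pvKeysErase {ν : Type} (d : PySem.Dict Int ν) (k : Int) :
    (d.erase k).keys = d.keys.filter (fun c => !(c == k)) := by
  show List.map (fun p => p.1) (d.items.filter (fun p => !(p.1 == k)))
    = (List.map (fun p => p.1) d.items).filter (fun c => !(c == k))
  induction d.items with
  | nil => simp
  | cons p t ih =>
    simp only [List.filter_cons, List.map_cons]
    cases hb : (p.1 == k) <;> simp [hb, ih]

lemma pvGetFoldlInsertConst (l : List Int) (a : Int) :
    ∀ (d : PySem.Dict Int Int) (x : Int),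
      (l.foldl (fun d w => d.insert w a) d).get? x = if x ∈ l then some a else d.get? x := by
  induction l with
  | nil =>
    intro d x
    simp
  | cons w t ih =>
    intro d x
    simp only [List.foldl_cons]
    rw [ih]
    by_cases hx : x ∈ t
    · simp [hx, List.mem_cons]
    · rw [if_neg hx, PySem.Dict.get?_insert]
      by_cases hxw : x = w
      · simp [hxw, List.mem_cons]
      · simp [hxw, List.mem_cons, hx]

lemma pvMemKeysOfGet {ν : Type} {d : PySem.Dict Int ν} {c : Int} {L : ν}
    (h : d.get? c = some L) : c ∈ d.keys := by
  by_contra hc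
  rw [← PySem.Dict.get?_eq_none_iff_not_mem_keys] at hc
  rw [h] at hc
  simp at hc

/- ===== B-side: the union-by-relabelling invariant ===== -/

/- Invariant of B's state after processing the edges E, with ns the set of registered nodes:
   idx labels exactly the registered nodes, members lists the label classes (disjoint, nonempty,
   consistent with idx), and two nodes share a label iff they are connected by edges of E. -/
structure pvGoodN (E : List (Int × Int)) (ns : Int → Prop)
    (st : PySem.Dict Int Int × PySem.Dict Int (List Int) × Int) : Prop where
  idxNodes : ∀ w, (st.1.get? w).isSome ↔ ns w
  nsNode : ∀ w, pvNode E w → ns w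
  idxKeysNodup : st.1.keys.Nodup
  memKeysNodup : st.2.1.keys.Nodup
  memList : ∀ c L, st.2.1.get? c = some L → L.Nodup ∧ ∀ w ∈ L, st.1.get? w = some c
  idxMem : ∀ w c, st.1.get? w = some c → ∃ L, st.2.1.get? c = some L ∧ w ∈ L
  classes : ∀ w w' c c', st.1.get? w = some c → st.1.get? w' = some c'
    → (c = c' ↔ pvReach E w w')
  freshBound : ∀ c, c ∈ st.2.1.keys → c < st.2.2

def pvAddNode (st : PySem.Dict Int Int × PySem.Dict Int (List Int) × Int) (u : Int) :
    PySem.Dict Int Int × PySem.Dict Int (List Int) × Int :=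
  if st.1.contains u then st
  else (st.1.insert u st.2.2, st.2.1.insert st.2.2 [u], st.2.2 + 1)

def pvUnionStep (st : PySem.Dict Int Int × PySem.Dict Int (List Int) × Int) (u v : Int) :
    PySem.Dict Int Int × PySem.Dict Int (List Int) × Int :=
  if st.1.getD u 0 ≠ st.1.getD v 0 then
    ((st.2.1.getD (st.1.getD v 0) []).foldl (fun d w => d.insert w (st.1.getD u 0)) st.1,
     (st.2.1.erase (st.1.getD v 0)).insert (st.1.getD u 0)
       (st.2.1.getD (st.1.getD u 0) [] ++ st.2.1.getD (st.1.getD v 0) []),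
     st.2.2)
  else st

lemma pvBStep_eq (st : PySem.Dict Int Int × PySem.Dict Int (List Int) × Int) (uv : Int × Int) :
    pvBStep st uv = pvUnionStep (pvAddNode (pvAddNode st uv.1) uv.2) uv.1 uv.2 := rfl

lemma pvGood_addNode {E : List (Int × Int)} {ns : Int → Prop}
    {st : PySem.Dict Int Int × PySem.Dict Int (List Int) × Int}
    (h : pvGoodN E ns st) (u : Int) :
    pvGoodN E (fun w => ns w ∨ w = u) (pvAddNode st u) := by
  unfold pvAddNode
  by_cases hc : st.1.contains u = true
  · rw [if_pos hc]
    have hnsu : ns u := by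
      rw [PySem.Dict.contains_eq_isSome_get?] at hc
      exact (h.idxNodes u).1 hc
    exact { h with
      idxNodes := fun w => (h.idxNodes w).trans
        ⟨Or.inl, fun hw => hw.elim id (fun hwu => hwu ▸ hnsu)⟩
      nsNode := fun w hw => Or.inl (h.nsNode w hw) }
  · rw [if_neg hc]
    rw [Bool.not_eq_true] at hc
    have hnone : st.1.get? u = none := (PySem.Dict.get?_eq_none_iff_contains _ _).2 hc
    have hnsu : ¬ ns u := by
      rw [← h.idxNodes u, hnone]
      simp
    have hfreshmem : st.2.2 ∉ st.2.1.keys := fun hm => absurd (h.freshBound _ hm) (by omega)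
    have hfreshcontains : st.2.1.contains st.2.2 = false := by
      by_contra hcc
      rw [Bool.not_eq_false, PySem.Dict.contains_iff_mem_keys] at hcc
      exact hfreshmem hcc
    have hidx : ∀ w, (st.1.insert u st.2.2).get? w
        = if w = u then some st.2.2 else st.1.get? w := fun w => PySem.Dict.get?_insert _ _ _ _
    have hmem : ∀ c, (st.2.1.insert st.2.2 [u]).get? c
        = if c = st.2.2 then some [u] else st.2.1.get? c := fun c => PySem.Dict.get?_insert _ _ _ _
    have hkeybound : ∀ c L, st.2.1.get? c = some L → c < st.2.2 :=
      fun c L hcl => h.freshBound c (pvMemKeysOfGet hcl)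
    refine ⟨?_, ?_, ?_, ?_, ?_, ?_, ?_, ?_⟩
    · intro w
      rw [hidx w]
      by_cases hw : w = u
      · simp [hw]
      · simp only [if_neg hw]
        exact (h.idxNodes w).trans ⟨Or.inl, fun hh => hh.elim id (fun h' => absurd h' hw)⟩
    · exact fun w hw => Or.inl (h.nsNode w hw)
    · exact PySem.Dict.nodup_keys_insert _ _ _ h.idxKeysNodup
    · exact PySem.Dict.nodup_keys_insert _ _ _ h.memKeysNodup
    · intro c L hcl
      rw [hmem c] at hcl
      by_cases hcf : c = st.2.2
      · subst hcf
        rw [if_pos rfl] at hcl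
        injection hcl with hL
        subst hL
        refine ⟨List.nodup_singleton _, fun w hw => ?_⟩
        rw [List.mem_singleton] at hw
        subst hw
        rw [hidx w, if_pos rfl]
      · rw [if_neg hcf] at hcl
        obtain ⟨hLnd, hLidx⟩ := h.memList c L hcl
        refine ⟨hLnd, fun w hw => ?_⟩
        have hold := hLidx w hw
        by_cases hwu : w = u
        · rw [hwu, hnone] at hold
          simp at hold
        · rw [hidx w, if_neg hwu]
          exact hold
    · intro w c hwc
      rw [hidx w] at hwc
      by_cases hwu : w = u
      · rw [if_pos hwu] at hwc
        injection hwc with hc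
        refine ⟨[u], ?_, ?_⟩
        · rw [hmem c, if_pos hc.symm]
        · rw [hwu]
          exact List.mem_singleton_self _
      · rw [if_neg hwu] at hwc
        obtain ⟨L, hL, hwL⟩ := h.idxMem w c hwc
        have hcb := hkeybound c L hL
        exact ⟨L, by rw [hmem c, if_neg (by omega : ¬ c = st.2.2)]; exact hL, hwL⟩
    · intro w w' c c' h1 h2
      rw [hidx w] at h1
      rw [hidx w'] at h2
      by_cases hw : w = u <;> by_cases hw' : w' = u
      · rw [if_pos hw] at h1
        rw [if_pos hw'] at h2
        injection h1 with hc1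
        injection h2 with hc2
        rw [← hc1, ← hc2]
        refine ⟨fun _ => ?_, fun _ => rfl⟩
        rw [hw, hw']
        exact Relation.ReflTransGen.refl
      · rw [if_pos hw] at h1
        rw [if_neg hw'] at h2
        injection h1 with hc1
        obtain ⟨L, hL, _⟩ := h.idxMem w' c' h2
        have hcb := hkeybound c' L hL
        constructor
        · intro hcc
          exfalso
          omega
        · intro hr
          exfalso
          rw [hw] at hr
          rcases pvReach_node hr with heq | ⟨hnu, _⟩
          · exact hw' heq.symm
          · exact hnsu (h.nsNode _ hnu)
      · rw [if_pos hw'] at h2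
        rw [if_neg hw] at h1
        injection h2 with hc2
        obtain ⟨L, hL, _⟩ := h.idxMem w c h1
        have hcb := hkeybound c L hL
        constructor
        · intro hcc
          exfalso
          omega
        · intro hr
          exfalso
          rw [hw'] at hr
          rcases pvReach_node (pvReach_symm hr) with heq | ⟨hnu, _⟩
          · exact hw heq.symm
          · exact hnsu (h.nsNode _ hnu)
      · rw [if_neg hw] at h1
        rw [if_neg hw'] at h2
        exact h.classes w w' c c' h1 h2
    · intro c hck
      have hkeys : (st.2.1.insert st.2.2 [u]).keys = st.2.1.keys ++ [st.2.2] :=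
        PySem.Dict.keys_insert_of_not_contains _ _ hfreshcontains
      rw [hkeys, List.mem_append, List.mem_singleton] at hck
      rcases hck with hck | rfl
      · have := h.freshBound c hck
        show c < st.2.2 + 1
        omega
      · show st.2.2 < st.2.2 + 1
        omega

lemma pvGood_union {E : List (Int × Int)} {ns : Int → Prop}
    {st : PySem.Dict Int Int × PySem.Dict Int (List Int) × Int} {u v : Int}
    (h : pvGoodN E ns st) (hu : ns u) (hv : ns v) :
    pvGoodN (E ++ [(u, v)]) ns (pvUnionStep st u v) := by
  obtain ⟨a, hua⟩ := Option.isSome_iff_exists.1 ((h.idxNodes u).2 hu)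
  obtain ⟨b, hvb⟩ := Option.isSome_iff_exists.1 ((h.idxNodes v).2 hv)
  have hgda : st.1.getD u 0 = a := PySem.Dict.getD_of_get?_eq_some _ _ hua
  have hgdb : st.1.getD v 0 = b := PySem.Dict.getD_of_get?_eq_some _ _ hvb
  obtain ⟨La, hLa, huLa⟩ := h.idxMem u a hua
  obtain ⟨Lb, hLb, hvLb⟩ := h.idxMem v b hvb
  have hgetDa : st.2.1.getD a [] = La := PySem.Dict.getD_of_get?_eq_some _ _ hLa
  have hgetDb : st.2.1.getD b [] = Lb := PySem.Dict.getD_of_get?_eq_some _ _ hLb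
  have hnsNode2 : ∀ w, pvNode (E ++ [(u, v)]) w → ns w := by
    intro w hw
    rcases pvNode_append.1 hw with (hw' | rfl) | rfl
    · exact h.nsNode w hw'
    · exact hu
    · exact hv
  unfold pvUnionStep
  rw [hgda, hgdb, hgetDa, hgetDb]
  by_cases hab : a = b
  · rw [if_neg (by simpa using hab)]
    have huv : pvReach E u v := (h.classes u v a b hua hvb).1 hab
    have hre : ∀ x y, pvReach (E ++ [(u, v)]) x y ↔ pvReach E x y := by
      intro x y
      rw [pvReach_append]
      constructor
      · rintro (h' | ⟨h1, h2⟩ | ⟨h1, h2⟩)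
        · exact h'
        · exact (h1.trans huv).trans h2
        · exact (h1.trans (pvReach_symm huv)).trans h2
      · exact Or.inl
    exact { h with
      nsNode := hnsNode2
      classes := fun w w' c c' h1 h2 => (h.classes w w' c c' h1 h2).trans (hre w w').symm }
  · rw [if_pos (by simpa using hab)]
    have hmemLb : ∀ w, w ∈ Lb ↔ st.1.get? w = some b := by
      intro w
      constructor
      · exact (h.memList b Lb hLb).2 w
      · intro hw
        obtain ⟨L', hL', hwL'⟩ := h.idxMem w b hw
        rw [hLb] at hL'
        injection hL' with hLL
        exact hLL ▸ hwL'
    have hmemLa : ∀ w, w ∈ La ↔ st.1.get? w = some a := by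
      intro w
      constructor
      · exact (h.memList a La hLa).2 w
      · intro hw
        obtain ⟨L', hL', hwL'⟩ := h.idxMem w a hw
        rw [hLa] at hL'
        injection hL' with hLL
        exact hLL ▸ hwL'
    have hdisj : ∀ w, w ∈ La → w ∈ Lb → False := by
      intro w h1 h2
      rw [hmemLa] at h1
      rw [hmemLb] at h2
      rw [h1] at h2
      injection h2 with hh
      exact hab hh
    have hidx : ∀ x, (Lb.foldl (fun d w => d.insert w a) st.1).get? x
        = if x ∈ Lb then some a else st.1.get? x := fun x => pvGetFoldlInsertConst Lb a st.1 x
    have hakeys : a ∈ st.2.1.keys := pvMemKeysOfGet hLa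
    have haerasekeys : a ∈ (st.2.1.erase b).keys := by
      rw [pvKeysErase, List.mem_filter]
      exact ⟨hakeys, by simpa using hab⟩
    have hacontains : (st.2.1.erase b).contains a = true :=
      (PySem.Dict.contains_iff_mem_keys _ _).2 haerasekeys
    have hmem' : ∀ c, ((st.2.1.erase b).insert a (La ++ Lb)).get? c
        = if c = a then some (La ++ Lb) else if c = b then none else st.2.1.get? c := by
      intro c
      rw [PySem.Dict.get?_insert]
      by_cases hca : c = a
      · rw [if_pos hca, if_pos hca]
      · rw [if_neg hca, if_neg hca, pvGetErase]
    -- the new class of w, as a function of the old one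
    have hclassOf : ∀ w c, (Lb.foldl (fun d w => d.insert w a) st.1).get? w = some c
        ↔ ∃ c0, st.1.get? w = some c0 ∧ c = (if c0 = b then a else c0) := by
      intro w c
      rw [hidx w]
      by_cases hwb : w ∈ Lb
      · rw [if_pos hwb]
        have hwold := (hmemLb w).1 hwb
        constructor
        · intro hc
          injection hc with hc
          exact ⟨b, hwold, by rw [if_pos rfl, hc]⟩
        · rintro ⟨c0, hc0, hcc⟩
          rw [hwold] at hc0
          injection hc0 with hc0
          subst hc0
          rw [if_pos rfl] at hcc
          rw [hcc]
      · rw [if_neg hwb]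
        constructor
        · intro hc
          refine ⟨c, hc, ?_⟩
          have hcb : ¬ c = b := by
            intro hcb
            exact hwb ((hmemLb w).2 (hcb ▸ hc))
          rw [if_neg hcb]
        · rintro ⟨c0, hc0, hcc⟩
          have hcb : ¬ c0 = b := by
            intro hcb
            exact hwb ((hmemLb w).2 (hcb ▸ hc0))
          rw [if_neg hcb] at hcc
          rw [hcc]
          exact hc0
    refine ⟨?_, hnsNode2, ?_, ?_, ?_, ?_, ?_, ?_⟩
    · intro w
      rw [hidx w]
      by_cases hwb : w ∈ Lb
      · rw [if_pos hwb]
        simp only [Option.isSome_some, true_iff]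
        rw [← h.idxNodes w, (hmemLb w).1 hwb]
        simp
      · rw [if_neg hwb]
        exact h.idxNodes w
    · exact PySem.Dict.nodup_keys_foldl_insert Lb (fun _ _ => a) st.1 h.idxKeysNodup
    · rw [PySem.Dict.keys_insert_of_contains _ _ hacontains, pvKeysErase]
      exact h.memKeysNodup.filter _
    · intro c L hcl
      rw [hmem' c] at hcl
      by_cases hca : c = a
      · subst hca
        rw [if_pos rfl] at hcl
        injection hcl with hL
        subst hL
        constructor
        · refine List.Nodup.append (h.memList c La hLa).1 (h.memList b Lb hLb).1 ?_
          intro y hy hyn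
          exact hdisj y hy hyn
        · intro w hw
          rw [hidx w]
          rcases List.mem_append.1 hw with hw' | hw'
          · rw [if_neg (fun hwb => hdisj w hw' hwb)]
            exact (hmemLa w).1 hw'
          · rw [if_pos hw']
      · rw [if_neg hca] at hcl
        by_cases hcb : c = b
        · rw [if_pos hcb] at hcl
          simp at hcl
        · rw [if_neg hcb] at hcl
          obtain ⟨hLnd, hLidx⟩ := h.memList c L hcl
          refine ⟨hLnd, fun w hw => ?_⟩
          rw [hidx w]
          have hwold := hLidx w hw
          rw [if_neg (fun hwb => hcb (by
            have := (hmemLb w).1 hwb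
            rw [hwold] at this
            injection this))]
          exact hwold
    · intro w c hwc
      rw [hclassOf w c] at hwc
      obtain ⟨c0, hc0, hcc⟩ := hwc
      by_cases hc0b : c0 = b
      · rw [if_pos hc0b] at hcc
        refine ⟨La ++ Lb, ?_, ?_⟩
        · show ((st.2.1.erase b).insert a (La ++ Lb)).get? c = some (La ++ Lb)
          rw [hmem' c, if_pos hcc]
        · exact List.mem_append_right _ ((hmemLb w).2 (hc0b ▸ hc0))
      · rw [if_neg hc0b] at hcc
        by_cases hc0a : c0 = a
        · refine ⟨La ++ Lb, ?_, ?_⟩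
          · show ((st.2.1.erase b).insert a (La ++ Lb)).get? c = some (La ++ Lb)
            rw [hmem' c, if_pos (hcc.trans hc0a)]
          · exact List.mem_append_left _ ((hmemLa w).2 (hc0a ▸ hc0))
        · obtain ⟨L, hL, hwL⟩ := h.idxMem w c0 hc0
          refine ⟨L, ?_, hwL⟩
          show ((st.2.1.erase b).insert a (La ++ Lb)).get? c = some L
          rw [hmem' c, if_neg (by rw [hcc]; exact hc0a), if_neg (by rw [hcc]; exact hc0b), hcc]
          exact hL
    · intro w w' c c' h1 h2
      rw [hclassOf w c] at h1
      rw [hclassOf w' c'] at h2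
      obtain ⟨c0, hc0, hcc⟩ := h1
      obtain ⟨c0', hc0', hcc'⟩ := h2
      have hold : c0 = c0' ↔ pvReach E w w' := h.classes w w' c0 c0' hc0 hc0'
      have hwu : c0 = a ↔ pvReach E w u := h.classes w u c0 a hc0 hua
      have hwv : c0 = b ↔ pvReach E w v := h.classes w v c0 b hc0 hvb
      have hvw' : b = c0' ↔ pvReach E v w' := h.classes v w' b c0' hvb hc0'
      have huw' : a = c0' ↔ pvReach E u w' := h.classes u w' a c0' hua hc0'
      rw [pvReach_append, ← hold, ← hwu, ← hwv, ← hvw', ← huw', hcc, hcc']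
      split_ifs <;> omega
    · intro c hck
      rw [PySem.Dict.keys_insert_of_contains _ _ hacontains, pvKeysErase,
        List.mem_filter] at hck
      exact h.freshBound c hck.1

lemma pvGoodN_congr {E : List (Int × Int)} {ns ns' : Int → Prop}
    {st : PySem.Dict Int Int × PySem.Dict Int (List Int) × Int}
    (hns : ∀ w, ns w ↔ ns' w) (h : pvGoodN E ns st) : pvGoodN E ns' st :=
  { h with
    idxNodes := fun w => (h.idxNodes w).trans (hns w)
    nsNode := fun w hw => (hns w).1 (h.nsNode w hw) }

lemma pvBStep_good {E : List (Int × Int)} {ns : Int → Prop}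
    {st : PySem.Dict Int Int × PySem.Dict Int (List Int) × Int}
    (h : pvGoodN E ns st) (uv : Int × Int) :
    pvGoodN (E ++ [(uv.1, uv.2)]) (fun w => (ns w ∨ w = uv.1) ∨ w = uv.2) (pvBStep st uv) := by
  rw [pvBStep_eq]
  exact pvGood_union (pvGood_addNode (pvGood_addNode h uv.1) uv.2)
    (Or.inl (Or.inr rfl)) (Or.inr rfl)

lemma pvFoldB : ∀ (rest E : List (Int × Int))
    (st : PySem.Dict Int Int × PySem.Dict Int (List Int) × Int),
    pvGoodN E (pvNode E) st →
    pvGoodN (E ++ rest) (pvNode (E ++ rest)) (rest.foldl pvBStep st) := by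
  intro rest
  induction rest with
  | nil =>
    intro E st h
    simpa using h
  | cons e t ih =>
    intro E st h
    have hstep := pvBStep_good h e
    have hstep' : pvGoodN (E ++ [(e.1, e.2)]) (pvNode (E ++ [(e.1, e.2)])) (pvBStep st e) := by
      refine pvGoodN_congr ?_ hstep
      intro w
      rw [pvNode_append]
    have he : (e.1, e.2) = e := rfl
    rw [he] at hstep'
    have := ih (E ++ [e]) (pvBStep st e) hstep'
    rw [List.append_cons]
    simpa using this

def pvStB (links : List (Int × Int)) : PySem.Dict Int Int × PySem.Dict Int (List Int) × Int :=
  links.foldl pvBStep (PySem.Dict.empty, PySem.Dict.empty, 0)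

def pvOutB (links : List (Int × Int)) (k : Int) : PySem.Set Int :=
  (pvStB links).2.1.values.foldl
    (fun out c => if k < (c.length : Int) then PySem.Set.update out c else out)
    PySem.Set.empty

lemma pvPortB_eq (links : List (Int × Int)) (k : Int) :
    suspicious_linked_accounts_alt links k = PySem.List.sorted (pvOutB links k) (fun x => x) false := rfl

lemma pvGoodB (links : List (Int × Int)) : pvGoodN links (pvNode links) (pvStB links) := by
  have hinit : pvGoodN [] (pvNode []) (PySem.Dict.empty, PySem.Dict.empty, 0) := by
    refine ⟨?_, ?_, ?_, ?_, ?_, ?_, ?_, ?_⟩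
    · intro w
      rw [PySem.Dict.get?_empty]
      simp [pvNode, pvAdjP]
    · intro w hw
      exact hw
    · rw [PySem.Dict.keys_empty]; exact List.nodup_nil
    · rw [PySem.Dict.keys_empty]; exact List.nodup_nil
    · intro c L hcl
      rw [PySem.Dict.get?_empty] at hcl
      simp at hcl
    · intro w c hwc
      rw [PySem.Dict.get?_empty] at hwc
      simp at hwc
    · intro w w' c c' h1 h2
      rw [PySem.Dict.get?_empty] at h1
      simp at h1
    · intro c hck
      rw [PySem.Dict.keys_empty] at hck
      simp at hck
  have := pvFoldB links [] (PySem.Dict.empty, PySem.Dict.empty, 0) hinit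
  simpa [pvStB] using this

lemma pvOutFold_mem (k : Int) (ls : List (List Int)) :
    ∀ (s : PySem.Set Int) (x : Int),
      x ∈ ls.foldl (fun out c => if k < (c.length : Int) then PySem.Set.update out c else out) s
        ↔ x ∈ s ∨ ∃ c, c ∈ ls ∧ k < (c.length : Int) ∧ x ∈ c := by
  induction ls with
  | nil =>
    intro s x
    simp
  | cons c t ih =>
    intro s x
    simp only [List.foldl_cons]
    by_cases hk : k < (c.length : Int)
    · rw [if_pos hk, ih, PySem.Set.mem_update]
      constructor
      · rintro ((hx | hx) | ⟨c', hc', hk', hx⟩)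
        · exact Or.inl hx
        · exact Or.inr ⟨c, List.mem_cons_self, hk, hx⟩
        · exact Or.inr ⟨c', List.mem_cons_of_mem _ hc', hk', hx⟩
      · rintro (hx | ⟨c', hc', hk', hx⟩)
        · exact Or.inl (Or.inl hx)
        · rcases List.mem_cons.1 hc' with rfl | hc''
          · exact Or.inl (Or.inr hx)
          · exact Or.inr ⟨c', hc'', hk', hx⟩
    · rw [if_neg hk, ih]
      constructor
      · rintro (hx | ⟨c', hc', hk', hx⟩)
        · exact Or.inl hx
        · exact Or.inr ⟨c', List.mem_cons_of_mem _ hc', hk', hx⟩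
      · rintro (hx | ⟨c', hc', hk', hx⟩)
        · exact Or.inl hx
        · rcases List.mem_cons.1 hc' with rfl | hc''
          · exact absurd hk' hk
          · exact Or.inr ⟨c', hc'', hk', hx⟩

lemma pvOutFold_nodup (k : Int) (ls : List (List Int)) :
    ∀ (s : PySem.Set Int), s.Nodup →
      (ls.foldl (fun out c => if k < (c.length : Int) then PySem.Set.update out c else out) s).Nodup := by
  induction ls with
  | nil =>
    intro s hs
    exact hs
  | cons c t ih =>
    intro s hs
    simp only [List.foldl_cons]
    by_cases hk : k < (c.length : Int)
    · rw [if_pos hk]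
      exact ih _ (PySem.Set.nodup_update _ _ hs)
    · rw [if_neg hk]
      exact ih _ hs

lemma pvCharB (links : List (Int × Int)) (k : Int) :
    (pvOutB links k).Nodup ∧
      ∀ x, x ∈ pvOutB links k ↔ pvNode links x ∧ pvBig links k x := by
  have g := pvGoodB links
  have hvalues : ∀ L, L ∈ (pvStB links).2.1.values ↔ ∃ c, (pvStB links).2.1.get? c = some L := by
    intro L
    show L ∈ List.map (fun p => p.2) (pvStB links).2.1.items ↔ _
    rw [List.mem_map]
    constructor
    · rintro ⟨⟨c, L'⟩, hp, rfl⟩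
      exact ⟨c, (PySem.Dict.get?_eq_some_iff_mem_items _ _ _ g.memKeysNodup).2 hp⟩
    · rintro ⟨c, hc⟩
      exact ⟨(c, L), (PySem.Dict.get?_eq_some_iff_mem_items _ _ _ g.memKeysNodup).1 hc, rfl⟩
  have hclass : ∀ x c L, (pvStB links).1.get? x = some c → (pvStB links).2.1.get? c = some L
      → pvIsComp links x L := by
    intro x c L hx hc
    refine ⟨(g.memList c L hc).1, fun y => ?_⟩
    constructor
    · intro hy
      have hyc := (g.memList c L hc).2 y hy
      refine ⟨(g.idxNodes y).1 (by rw [hyc]; rfl), ?_⟩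
      exact (g.classes x y c c hx hyc).1 rfl
    · rintro ⟨hnode, hr⟩
      obtain ⟨c', hyc'⟩ := Option.isSome_iff_exists.1 ((g.idxNodes y).2 hnode)
      have : c = c' := (g.classes x y c c' hx hyc').2 hr
      subst this
      obtain ⟨L', hL', hyL'⟩ := g.idxMem y c hyc'
      rw [hc] at hL'
      injection hL' with hLL
      exact hLL ▸ hyL'
  constructor
  · exact pvOutFold_nodup k _ _ List.nodup_nil
  · intro x
    rw [pvOutB, pvOutFold_mem]
    simp only [PySem.Set.empty, List.not_mem_nil, false_or]
    constructor
    · rintro ⟨L, hLv, hk, hxL⟩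
      obtain ⟨c, hc⟩ := (hvalues L).1 hLv
      have hxc : (pvStB links).1.get? x = some c := (g.memList c L hc).2 x hxL
      have hcomp := hclass x c L hxc hc
      exact ⟨(g.idxNodes x).1 (by rw [hxc]; rfl), (pvBig_iff hcomp).2 hk⟩
    · rintro ⟨hnode, hbig⟩
      obtain ⟨c, hxc⟩ := Option.isSome_iff_exists.1 ((g.idxNodes x).2 hnode)
      obtain ⟨L, hc, hxL⟩ := g.idxMem x c hxc
      have hcomp := hclass x c L hxc hc
      exact ⟨L, (hvalues L).2 ⟨c, hc⟩, (pvBig_iff hcomp).1 hbig, hxL⟩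

-- ===== VERDICT (by name: the statement is the Claim_ definition above) =====
theorem suspicious_linked_accounts_spec : Claim_equal_suspicious_linked_accounts := by
  intro links k _
  unfold Spec_suspicious_linked_accounts
  rw [pvPortA_eq, pvPortB_eq]
  obtain ⟨hndA, hA⟩ := pvCharA links k
  obtain ⟨hndB, hB⟩ := pvCharB links k
  exact PySem.List.sorted_eq_sorted_of_perm _ _ _ (fun _ _ h => h)
    ((List.perm_ext_iff_of_nodup hndA hndB).2 fun x => (hA x).trans (hB x).symm)
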